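-- pv_equiv track=rewrite | github.com/13sachin/aqtivate_tn_hackathon | qft_encoding.py | encode_position
-- ===== SOURCE A (Python) =====
-- def encode_position(row, col):
--     # Start with an empty bit string
--     bits = []
--
--     # First bit: 0 for left 16x8 submatrix, 1 for right 16x8 submatrix
--     bits.append((col >> 3) & 1)
--
--     # Second bit: 0 for upper 8x8 submatrix within the 16x8 submatrix, 1 for lower 8x8 submatrix
--     bits.append((row >> 3) & 1)
--
--     # Third bit: 0 for left 8x4 submatrix within the 8x8 submatrix, 1 for right 8x4 submatrix
--     bits.append((col >> 2) & 1)
--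
--     # Fourth bit: 0 for upper 4x4 submatrix within the 8x4 submatrix, 1 for lower 4x4 submatrix
--     bits.append((row >> 2) & 1)
--
--     # Fifth bit: 0 for left 4x2 submatrix within the 4x4 submatrix, 1 for right 4x2 submatrix
--     bits.append((col >> 1) & 1)
--
--     # Sixth bit: 0 for upper 2x2 submatrix within the 4x2 submatrix, 1 for lower 2x2 submatrix
--     bits.append((row >> 1) & 1)
--
--     # Seventh bit: 0 for left 2x1 submatrix within the 2x2 submatrix, 1 for right 2x1 submatrix
--     bits.append(col & 1)
--
--     # Eighth bit: 0 for upper 1x1 submatrix within the 2x1 submatrix, 1 for lower 1x1 submatrix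
--     bits.append(row & 1)
--
--     # Reverse the bit order
--     bits.reverse()
--
--     # Convert bits to a single byte integer
--     byte_value = 0
--     for bit in bits:
--         byte_value = (byte_value << 1) | bit
--
--     return byte_value
-- ===== SOURCE B (Python) =====
-- def encode_position(row, col):
--     # Closed-form bit assembly: OR together each masked bit at its final position,
--     # instead of building a list, reversing it and folding.
--     return ((row & 1) << 7) | ((col & 1) << 6) \
--          | (((row >> 1) & 1) << 5) | (((col >> 1) & 1) << 4) \
--          | (((row >> 2) & 1) << 3) | (((col >> 2) & 1) << 2) \
--          | (((row >> 3) & 1) << 1) | ((col >> 3) & 1)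
-- ===== Notes on version B (the rewrite author's own statement) =====
-- stated objective: simpler
-- what changed: Replaces the list build + reverse + shift-accumulate fold with one closed-form expression that ORs each masked bit shifted directly to its final position.
import Mathlib
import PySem

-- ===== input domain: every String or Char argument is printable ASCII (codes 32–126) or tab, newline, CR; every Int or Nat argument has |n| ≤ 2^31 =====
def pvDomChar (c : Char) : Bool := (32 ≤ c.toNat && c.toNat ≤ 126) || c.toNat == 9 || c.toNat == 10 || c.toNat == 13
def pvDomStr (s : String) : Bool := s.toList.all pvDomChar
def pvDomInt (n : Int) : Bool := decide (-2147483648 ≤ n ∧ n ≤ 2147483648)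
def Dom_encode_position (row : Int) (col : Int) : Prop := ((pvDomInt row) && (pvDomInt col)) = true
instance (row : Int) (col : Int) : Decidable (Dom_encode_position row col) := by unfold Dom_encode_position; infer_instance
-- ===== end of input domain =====

-- B: one closed-form OR of shifted masked bits instead of A's list+reverse+fold (simpler; same O(1) cost).


-- ===== PORT A =====
-- Literal port of A: build the bits list, reverse it, fold shifting in each bit.
def encode_position (row : Int) (col : Int) : Int :=
  let bits : List Int :=
    [PySem.Int.band (col >>> 3) 1, PySem.Int.band (row >>> 3) 1,
     PySem.Int.band (col >>> 2) 1, PySem.Int.band (row >>> 2) 1,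
     PySem.Int.band (col >>> 1) 1, PySem.Int.band (row >>> 1) 1,
     PySem.Int.band col 1, PySem.Int.band row 1]
  let bits := bits.reverse
  bits.foldl (fun byte_value bit => PySem.Int.bor (byte_value <<< 1) bit) 0

-- ===== PORT B =====
-- Port of B: one closed-form OR of the masked bits at their final positions.
def encode_position_alt (row : Int) (col : Int) : Int :=
  PySem.Int.bor ((PySem.Int.band row 1) <<< 7) (PySem.Int.bor ((PySem.Int.band col 1) <<< 6)
  (PySem.Int.bor ((PySem.Int.band (row >>> 1) 1) <<< 5) (PySem.Int.bor ((PySem.Int.band (col >>> 1) 1) <<< 4)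
  (PySem.Int.bor ((PySem.Int.band (row >>> 2) 1) <<< 3) (PySem.Int.bor ((PySem.Int.band (col >>> 2) 1) <<< 2)
  (PySem.Int.bor ((PySem.Int.band (row >>> 3) 1) <<< 1) (PySem.Int.band (col >>> 3) 1)))))))

-- ===== PRECONDITION & SPEC =====
def Spec_encode_position (row : Int) (col : Int) (out : Int) : Prop := out = encode_position_alt row col
instance (row : Int) (col : Int) (out : Int) : Decidable (Spec_encode_position row col out) := by unfold Spec_encode_position; infer_instance

-- B replaces the list/reverse/fold assembly with one closed-form bit expression.
-- ===== CLAIM (what is proved, stated in full; the proofs are below) =====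
def Claim_equal_encode_position : Prop := ∀ (row : Int) (col : Int), Dom_encode_position row col → Spec_encode_position row col (encode_position row col)

-- ===== LEMMAS AND PROOFS =====

-- ===== VERDICT (by name: the statement is the Claim_ definition above) =====
lemma band_one_cases (x : Int) : PySem.Int.band x 1 = 0 ∨ PySem.Int.band x 1 = 1 := by
  rw [PySem.Int.band_one]
  have h1 : 0 ≤ PySem.Int.mod x 2 := PySem.Int.mod_nonneg x (by norm_num)
  have h2 : PySem.Int.mod x 2 < 2 := PySem.Int.mod_lt x (by norm_num)
  omega

lemma exists_bit (x : Int) : ∃ b : Bool, PySem.Int.band x 1 = cond b 1 0 := by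
  rcases band_one_cases x with h | h
  · exact ⟨false, by simp [h]⟩
  · exact ⟨true, by simp [h]⟩

-- the assembly identity on the 8 abstract bits, checked over all 256 bit patterns
lemma assemble_key (a b c d e f g h : Bool) :
    (([(cond h (1:Int) 0), cond g 1 0, cond f 1 0, cond e 1 0, cond d 1 0, cond c 1 0,
       cond b 1 0, cond a 1 0] : List Int).reverse).foldl
      (fun byte_value bit => PySem.Int.bor (byte_value <<< 1) bit) 0
    = PySem.Int.bor ((cond a (1:Int) 0) <<< 7) (PySem.Int.bor ((cond b (1:Int) 0) <<< 6)
      (PySem.Int.bor ((cond c (1:Int) 0) <<< 5) (PySem.Int.bor ((cond d (1:Int) 0) <<< 4)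
      (PySem.Int.bor ((cond e (1:Int) 0) <<< 3) (PySem.Int.bor ((cond f (1:Int) 0) <<< 2)
      (PySem.Int.bor ((cond g (1:Int) 0) <<< 1) (cond h (1:Int) 0))))))) := by
  revert a b c d e f g h
  decide

theorem encode_position_spec : Claim_equal_encode_position := by
  intro row col _
  show encode_position row col = encode_position_alt row col
  obtain ⟨a, ha⟩ := exists_bit row
  obtain ⟨b, hb⟩ := exists_bit col
  obtain ⟨c, hc⟩ := exists_bit (row >>> 1)
  obtain ⟨d, hd⟩ := exists_bit (col >>> 1)
  obtain ⟨e, he⟩ := exists_bit (row >>> 2)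
  obtain ⟨f, hf⟩ := exists_bit (col >>> 2)
  obtain ⟨g, hg⟩ := exists_bit (row >>> 3)
  obtain ⟨h, hh⟩ := exists_bit (col >>> 3)
  simp only [encode_position, encode_position_alt]
  rw [ha, hb, hc, hd, he, hf, hg, hh]
  exact assemble_key a b c d e f g h
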